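-- pv_equiv track=rewrite | github.com/sajjadali56/pricing-django | myapp/views.py | translate_format11
-- ===== SOURCE A (Python) =====
-- def translate_format11(input_format):
--             format_translation = {
--                 'yyyy': '%Y',  # Replace 'yyyy' first to prevent conflict with 'yy'
--                 'mm': '%m',
--                 'dd': '%d',
--                 'yy': '%y'    # 'yy' should be replaced after 'yyyy' has been replaced
--             }
--             for key, value in format_translation.items():
--                 input_format = input_format.replace(key, value)
--             return input_format
-- ===== SOURCE B (Python) =====
-- def translate_format11(input_format):
--     tokens = (('yyyy', '%Y'), ('mm', '%m'), ('dd', '%d'), ('yy', '%y'))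
--     pieces = []
--     i = 0
--     n = len(input_format)
--     while i < n:
--         for token, code in tokens:
--             if input_format.startswith(token, i):
--                 pieces.append(code)
--                 i += len(token)
--                 break
--         else:
--             pieces.append(input_format[i])
--             i += 1
--     return ''.join(pieces)
-- ===== Notes on version B (the rewrite author's own statement) =====
-- stated objective: alternative
-- what changed: Replaces A's four sequential whole-string str.replace passes with a single left-to-right scan that tries the tokens yyyy, mm, dd, yy at each position and emits either a strftime code or the current character.
import Mathlib
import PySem

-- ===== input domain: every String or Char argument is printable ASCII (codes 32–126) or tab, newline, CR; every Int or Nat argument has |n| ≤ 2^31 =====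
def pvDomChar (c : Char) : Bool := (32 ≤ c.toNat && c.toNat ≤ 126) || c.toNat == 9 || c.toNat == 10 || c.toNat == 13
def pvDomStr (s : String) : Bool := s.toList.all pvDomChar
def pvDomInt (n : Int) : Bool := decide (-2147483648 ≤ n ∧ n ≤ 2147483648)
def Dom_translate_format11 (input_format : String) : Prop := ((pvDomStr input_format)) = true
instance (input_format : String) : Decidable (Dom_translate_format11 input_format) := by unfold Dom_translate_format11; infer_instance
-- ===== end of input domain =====

-- B replaces A's four sequential str.replace passes by one left-to-right scan trying
-- the tokens yyyy, mm, dd, yy at each position (alternative decomposition, same cost).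

-- ===== PORT A =====
-- the dict's four (key, value) pairs are applied in insertion order, one replace each
def translate_format11 (input_format : String) : String :=
  let s1 := PySem.Str.replace input_format "yyyy" "%Y"
  let s2 := PySem.Str.replace s1 "mm" "%m"
  let s3 := PySem.Str.replace s2 "dd" "%d"
  PySem.Str.replace s3 "yy" "%y"

-- ===== PORT B =====
-- Source B's while loop: at index i try each token with startswith; emit its code or the char
def scanAux : List Char → List Char
  | [] => []
  | c :: t =>
    if ['y','y','y','y'].isPrefixOf (c :: t) then '%' :: 'Y' :: scanAux (t.drop 3)
    else if ['m','m'].isPrefixOf (c :: t) then '%' :: 'm' :: scanAux (t.drop 1)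
    else if ['d','d'].isPrefixOf (c :: t) then '%' :: 'd' :: scanAux (t.drop 1)
    else if ['y','y'].isPrefixOf (c :: t) then '%' :: 'y' :: scanAux (t.drop 1)
    else c :: scanAux t
termination_by l => l.length
decreasing_by
  all_goals simp [List.length_drop]

def translate_format11_alt (input_format : String) : String :=
  String.ofList (scanAux input_format.toList)

-- ===== PRECONDITION & SPEC =====
def Spec_translate_format11 (input_format : String) (out : String) : Prop := out = translate_format11_alt input_format
instance (input_format : String) (out : String) : Decidable (Spec_translate_format11 input_format out) := by unfold Spec_translate_format11; infer_instance

-- ===== CLAIM (what is proved, stated in full; the proofs are below) =====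
def Claim_equal_translate_format11 : Prop := ∀ (input_format : String), Dom_translate_format11 input_format → Spec_translate_format11 input_format (translate_format11 input_format)

-- ===== LEMMAS AND PROOFS =====

-- a simple structural model of Python's str.replace for a nonempty pattern
def rep (old new : List Char) : List Char → List Char
  | [] => []
  | c :: t =>
    if old.isPrefixOf (c :: t) then new ++ rep old new (t.drop (old.length - 1))
    else c :: rep old new t
termination_by l => l.length
decreasing_by
  all_goals simp [List.length_drop]

theorem go_eq_rep (old new : List Char) (hold : old ≠ []) :
    ∀ (fuel : Nat) (l acc : List Char), l.length ≤ fuel →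
      PySem.Chars.replace.go old new fuel l acc = acc.reverse ++ rep old new l := by
  intro fuel
  induction fuel with
  | zero =>
    intro l acc h
    have : l = [] := by
      cases l with
      | nil => rfl
      | cons c t => simp at h
    subst this
    simp [PySem.Chars.replace.go, rep]
  | succ n ih =>
    intro l acc h
    cases l with
    | nil => simp [PySem.Chars.replace.go, rep]
    | cons c t =>
      rw [PySem.Chars.replace.go]
      by_cases hp : old.isPrefixOf (c :: t)
      · rw [if_pos hp]
        have h1 : 1 ≤ old.length := by
          cases old with
          | nil => exact absurd rfl hold
          | cons a b => simp
        have hlen : ((c :: t).drop old.length).length ≤ n := by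
          simp only [List.length_drop, List.length_cons]
          simp only [List.length_cons] at h
          omega
        rw [ih _ _ hlen]
        have hdrop : (c :: t).drop old.length = t.drop (old.length - 1) := by
          cases old with
          | nil => exact absurd rfl hold
          | cons a b => simp
        rw [rep, if_pos hp, hdrop]
        simp
      · rw [if_neg hp]
        have hlen : t.length ≤ n := by simp at h; omega
        rw [ih _ _ hlen]
        rw [rep, if_neg hp]
        simp

theorem replace_eq_rep (old new l : List Char) (hold : old ≠ []) :
    PySem.Chars.replace l old new = rep old new l := by
  rw [PySem.Chars.replace]
  rw [if_neg (by simpa using hold)]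
  simpa using go_eq_rep old new hold l.length l [] (le_refl _)

-- no match at the head: the head character is copied
theorem rep_cons (old new : List Char) (c : Char) (t : List Char)
    (h : ¬ old.isPrefixOf (c :: t)) :
    rep old new (c :: t) = c :: rep old new t := by
  rw [rep, if_neg h]

-- head of a rep-result with a '%'-headed replacement: '%' or the original head
theorem rep_head (old new : List Char) (hn : new.head? = some '%') (u : List Char) :
    (rep old new u).head? = some '%' ∨ (rep old new u).head? = u.head? := by
  cases u with
  | nil => right; simp [rep]
  | cons a t =>
    rw [rep]
    by_cases hp : old.isPrefixOf (a :: t)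
    · rw [if_pos hp]
      left
      cases new with
      | nil => simp at hn
      | cons x xs => simp at hn; simp [hn]
    · rw [if_neg hp]; right; rfl

-- a two-character token aa still finds no match after the tail is rewritten,
-- provided the rewritten tail's head is '%' or the old head
theorem nomatch_two (a c : Char) (t v : List Char) (ha : a ≠ '%')
    (hv : v.head? = some '%' ∨ v.head? = t.head?)
    (h : ¬ ([a, a] : List Char).isPrefixOf (c :: t)) :
    ¬ ([a, a] : List Char).isPrefixOf (c :: v) := by
  intro hp
  cases v with
  | nil => simp [List.isPrefixOf] at hp
  | cons b u =>
    simp [List.isPrefixOf] at hp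
    obtain ⟨hac, hab⟩ := hp
    rcases hv with hv | hv
    · simp at hv; exact ha (hab.trans hv)
    · cases t with
      | nil => simp at hv
      | cons d u' =>
        simp at hv
        apply h
        have hcd : c = d := by rw [← hac, hab, hv]
        simp [List.isPrefixOf, hac, hcd]

def chain (l : List Char) : List Char :=
  rep ['y','y'] ['%','y'] (rep ['d','d'] ['%','d'] (rep ['m','m'] ['%','m'] (rep ['y','y','y','y'] ['%','Y'] l)))

theorem chain_eq_scanAux : ∀ (l : List Char), chain l = scanAux l := by
  intro l
  induction hn : l.length using Nat.strong_induction_on generalizing l with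
  | _ n ih =>
  subst hn
  cases l with
  | nil => simp [chain, scanAux, rep]
  | cons c t =>
    by_cases h4 : (['y','y','y','y'] : List Char).isPrefixOf (c :: t)
    · -- yyyy matches at the head
      obtain ⟨t', ht⟩ : ∃ t', c :: t = 'y'::'y'::'y'::'y'::t' := by
        rw [List.isPrefixOf_iff_prefix] at h4
        obtain ⟨u, hu⟩ := h4
        exact ⟨u, hu.symm⟩
      rw [ht] at ih ⊢
      have e : chain ('y'::'y'::'y'::'y'::t') = '%'::'Y':: chain t' := by
        unfold chain
        rw [show rep ['y','y','y','y'] ['%','Y'] ('y'::'y'::'y'::'y'::t')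
              = '%'::'Y':: rep ['y','y','y','y'] ['%','Y'] t' by
          rw [rep, if_pos (by simp [List.isPrefixOf])]; rfl]
        rw [rep_cons ['m','m'] ['%','m'] '%' _ (by simp [List.isPrefixOf]),
            rep_cons ['m','m'] ['%','m'] 'Y' _ (by simp [List.isPrefixOf]),
            rep_cons ['d','d'] ['%','d'] '%' _ (by simp [List.isPrefixOf]),
            rep_cons ['d','d'] ['%','d'] 'Y' _ (by simp [List.isPrefixOf]),
            rep_cons ['y','y'] ['%','y'] '%' _ (by simp [List.isPrefixOf]),
            rep_cons ['y','y'] ['%','y'] 'Y' _ (by simp [List.isPrefixOf])]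
      rw [e, scanAux, if_pos (by simp [List.isPrefixOf])]
      simp only [List.drop]
      rw [ih t'.length (by simp only [List.length_cons]; omega) t' rfl]
    · by_cases hm : (['m','m'] : List Char).isPrefixOf (c :: t)
      · obtain ⟨t', ht⟩ : ∃ t', c :: t = 'm'::'m'::t' := by
          rw [List.isPrefixOf_iff_prefix] at hm
          obtain ⟨u, hu⟩ := hm
          exact ⟨u, hu.symm⟩
        rw [ht] at ih h4 ⊢
        have e : chain ('m'::'m'::t') = '%'::'m':: chain t' := by
          unfold chain
          rw [rep_cons ['y','y','y','y'] ['%','Y'] 'm' _ (by simp [List.isPrefixOf]),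
              rep_cons ['y','y','y','y'] ['%','Y'] 'm' _ (by simp [List.isPrefixOf])]
          rw [show rep ['m','m'] ['%','m'] ('m'::'m':: rep ['y','y','y','y'] ['%','Y'] t')
                = '%'::'m':: rep ['m','m'] ['%','m'] (rep ['y','y','y','y'] ['%','Y'] t') by
            rw [rep, if_pos (by simp [List.isPrefixOf])]; rfl]
          rw [rep_cons ['d','d'] ['%','d'] '%' _ (by simp [List.isPrefixOf]),
              rep_cons ['d','d'] ['%','d'] 'm' _ (by simp [List.isPrefixOf]),
              rep_cons ['y','y'] ['%','y'] '%' _ (by simp [List.isPrefixOf]),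
              rep_cons ['y','y'] ['%','y'] 'm' _ (by simp [List.isPrefixOf])]
        rw [e, scanAux, if_neg h4, if_pos (by simp [List.isPrefixOf])]
        simp only [List.drop]
        rw [ih t'.length (by simp only [List.length_cons]; omega) t' rfl]
      · by_cases hd : (['d','d'] : List Char).isPrefixOf (c :: t)
        · obtain ⟨t', ht⟩ : ∃ t', c :: t = 'd'::'d'::t' := by
            rw [List.isPrefixOf_iff_prefix] at hd
            obtain ⟨u, hu⟩ := hd
            exact ⟨u, hu.symm⟩
          rw [ht] at ih h4 hm ⊢
          have e : chain ('d'::'d'::t') = '%'::'d':: chain t' := by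
            unfold chain
            rw [rep_cons ['y','y','y','y'] ['%','Y'] 'd' _ (by simp [List.isPrefixOf]),
                rep_cons ['y','y','y','y'] ['%','Y'] 'd' _ (by simp [List.isPrefixOf]),
                rep_cons ['m','m'] ['%','m'] 'd' _ (by simp [List.isPrefixOf]),
                rep_cons ['m','m'] ['%','m'] 'd' _ (by simp [List.isPrefixOf])]
            rw [show rep ['d','d'] ['%','d'] ('d'::'d':: rep ['m','m'] ['%','m'] (rep ['y','y','y','y'] ['%','Y'] t'))
                  = '%'::'d':: rep ['d','d'] ['%','d'] (rep ['m','m'] ['%','m'] (rep ['y','y','y','y'] ['%','Y'] t')) by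
              rw [rep, if_pos (by simp [List.isPrefixOf])]; rfl]
            rw [rep_cons ['y','y'] ['%','y'] '%' _ (by simp [List.isPrefixOf]),
                rep_cons ['y','y'] ['%','y'] 'd' _ (by simp [List.isPrefixOf])]
          rw [e, scanAux, if_neg h4, if_neg hm, if_pos (by simp [List.isPrefixOf])]
          simp only [List.drop]
          rw [ih t'.length (by simp only [List.length_cons]; omega) t' rfl]
        · by_cases h2 : (['y','y'] : List Char).isPrefixOf (c :: t)
          · obtain ⟨t', ht⟩ : ∃ t', c :: t = 'y'::'y'::t' := by
              rw [List.isPrefixOf_iff_prefix] at h2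
              obtain ⟨u, hu⟩ := h2
              exact ⟨u, hu.symm⟩
            rw [ht] at ih h4 hm hd ⊢
            have h4' : ¬ (['y','y','y','y'] : List Char).isPrefixOf ('y'::t') := by
              intro hpre
              apply h4
              rw [List.isPrefixOf_iff_prefix] at hpre ⊢
              obtain ⟨u, hu⟩ := hpre
              have ht' : t' = 'y'::'y'::'y'::u := by
                simp at hu
                exact hu.symm
              exact ⟨'y'::u, by simp [ht']⟩
            have e : chain ('y'::'y'::t') = '%'::'y':: chain t' := by
              unfold chain
              rw [rep_cons ['y','y','y','y'] ['%','Y'] 'y' _ h4,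
                  rep_cons ['y','y','y','y'] ['%','Y'] 'y' _ h4',
                  rep_cons ['m','m'] ['%','m'] 'y' _ (by simp [List.isPrefixOf]),
                  rep_cons ['m','m'] ['%','m'] 'y' _ (by simp [List.isPrefixOf]),
                  rep_cons ['d','d'] ['%','d'] 'y' _ (by simp [List.isPrefixOf]),
                  rep_cons ['d','d'] ['%','d'] 'y' _ (by simp [List.isPrefixOf])]
              rw [show rep ['y','y'] ['%','y'] ('y'::'y':: rep ['d','d'] ['%','d'] (rep ['m','m'] ['%','m'] (rep ['y','y','y','y'] ['%','Y'] t')))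
                    = '%'::'y':: rep ['y','y'] ['%','y'] (rep ['d','d'] ['%','d'] (rep ['m','m'] ['%','m'] (rep ['y','y','y','y'] ['%','Y'] t'))) by
                rw [rep, if_pos (by simp [List.isPrefixOf])]; rfl]
            rw [e, scanAux, if_neg h4, if_neg hm, if_neg hd, if_pos (by simp [List.isPrefixOf])]
            simp only [List.drop]
            rw [ih t'.length (by simp only [List.length_cons]; omega) t' rfl]
          · -- no token matches at position 0: every pass copies the head character
            have hv1 := rep_head ['y','y','y','y'] ['%','Y'] (by rfl) t
            have hv2 : (rep ['m','m'] ['%','m'] (rep ['y','y','y','y'] ['%','Y'] t)).head? = some '%' ∨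
                (rep ['m','m'] ['%','m'] (rep ['y','y','y','y'] ['%','Y'] t)).head? = t.head? := by
              rcases rep_head ['m','m'] ['%','m'] (by rfl) (rep ['y','y','y','y'] ['%','Y'] t) with h | h
              · exact Or.inl h
              · rw [h]; exact hv1
            have hv3 : (rep ['d','d'] ['%','d'] (rep ['m','m'] ['%','m'] (rep ['y','y','y','y'] ['%','Y'] t))).head? = some '%' ∨
                (rep ['d','d'] ['%','d'] (rep ['m','m'] ['%','m'] (rep ['y','y','y','y'] ['%','Y'] t))).head? = t.head? := by
              rcases rep_head ['d','d'] ['%','d'] (by rfl) (rep ['m','m'] ['%','m'] (rep ['y','y','y','y'] ['%','Y'] t)) with h | h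
              · exact Or.inl h
              · rw [h]; exact hv2
            have e : chain (c :: t) = c :: chain t := by
              unfold chain
              rw [rep_cons ['y','y','y','y'] ['%','Y'] c _ h4]
              rw [rep_cons ['m','m'] ['%','m'] c _ (nomatch_two 'm' c t _ (by decide) hv1 hm)]
              rw [rep_cons ['d','d'] ['%','d'] c _ (nomatch_two 'd' c t _ (by decide) hv2 hd)]
              rw [rep_cons ['y','y'] ['%','y'] c _ (nomatch_two 'y' c t _ (by decide) hv3 h2)]
            rw [e, scanAux, if_neg h4, if_neg hm, if_neg hd, if_neg h2]
            rw [ih t.length (by simp only [List.length_cons]; omega) t rfl]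

theorem toList_translate (s : String) :
    (translate_format11 s).toList = chain s.toList := by
  unfold translate_format11 chain
  simp only [PySem.Str.toList_replace]
  rw [replace_eq_rep _ _ _ (by simp), replace_eq_rep _ _ _ (by simp),
      replace_eq_rep _ _ _ (by simp), replace_eq_rep _ _ _ (by simp)]
  rfl

-- ===== VERDICT (by name: the statement is the Claim_ definition above) =====
theorem translate_format11_spec : Claim_equal_translate_format11 := by
  intro s _
  unfold Spec_translate_format11 translate_format11_alt
  have h : (translate_format11 s).toList = scanAux s.toList := by
    rw [toList_translate, chain_eq_scanAux]
  apply String.toList_inj.mp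
  rw [h]
  exact String.ofList_eq.mp rfl
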